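-- pv_equiv track=rewrite | github.com/Adee81/Algoritmusok | 02_Rekurzio/feladat.py | isWinning
-- ===== SOURCE A (Python) =====
-- g = {}
--
-- def f(n):
--     if n < 0:
--         return -1
--     if n not in g:
--         h = set()
--         h.add(f(n - 1))
--         h.add(f(n - 2))
--         for i in range(1, n // 2 + 1):
--             h.add(f(i) ^ f(n - i - 1))
--             h.add(f(i) ^ f(n - i - 2))
--         i = 0
--         while i in h:
--             i += 1
--         g[n] = i
--     return g[n]
--
-- def isWinning(n, config):
--     x = 0
--     c = 0
--     for i in config:
--         if i == 'I':
--             c += 1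
--         elif c:
--             x ^= f(c)
--             c = 0
--     if c:
--         x ^= f(c)
--     return "WIN" if x else "LOSE"
-- ===== SOURCE B (Python) =====
-- def isWinning(n, config):
--     # split the string on non-'I' characters to get the run lengths
--     masked = ''.join(ch if ch == 'I' else ' ' for ch in config)
--     runs = [len(p) for p in masked.split()]
--     m = max(runs, default=0)
--     # bottom-up Grundy table g[0..m] (Kayles-style moves; -1 is the "off the board" sentinel)
--     g = [0]
--     for k in range(1, m + 1):
--         reach = {g[k - 1], g[k - 2] if k >= 2 else -1}
--         for i in range(1, k // 2 + 1):
--             reach.add(g[i] ^ g[k - i - 1])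
--             reach.add(g[i] ^ (g[k - i - 2] if k >= i + 2 else -1))
--         v = 0
--         while v in reach:
--             v += 1
--         g.append(v)
--     x = 0
--     for r in runs:
--         x ^= g[r]
--     return "WIN" if x else "LOSE"
-- ===== Notes on version B (the rewrite author's own statement) =====
-- stated objective: alternative
-- what changed: The memoized top-down recursion f (deep Python recursion per run) is replaced by a bottom-up Grundy table filled iteratively once up to the longest run, and the runs are obtained by masking non-'I' characters and splitting, instead of the interleaved counter/xor pass.
import Mathlib
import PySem

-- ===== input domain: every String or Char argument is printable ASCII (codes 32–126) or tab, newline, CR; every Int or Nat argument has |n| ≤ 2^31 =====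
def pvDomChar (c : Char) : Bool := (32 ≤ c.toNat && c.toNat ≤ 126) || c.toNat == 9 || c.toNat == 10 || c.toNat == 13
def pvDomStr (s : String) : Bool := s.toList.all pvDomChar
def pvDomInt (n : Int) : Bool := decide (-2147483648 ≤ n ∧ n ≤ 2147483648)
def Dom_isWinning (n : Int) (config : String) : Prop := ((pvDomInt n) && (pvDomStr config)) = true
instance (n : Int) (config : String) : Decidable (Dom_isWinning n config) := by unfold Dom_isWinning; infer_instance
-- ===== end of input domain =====

-- B replaces the memoized recursion `f` by a bottom-up Grundy table filled once up to the
-- longest run, and gets the run lengths by splitting the masked string (objective: alternative).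

-- ===== PORT A =====
-- `i = 0; while i in h: i += 1` — mex scan; fuel `h.length + 1` always suffices (the i's
-- visited are distinct members of h), so this is exactly Python's loop.
def mexLoopA (h : PySem.Set Int) : Nat → Int → Int
  | 0, i => i
  | fuel + 1, i => if i ∈ h then mexLoopA h fuel (i + 1) else i

-- literal port of `f` (the memo dict only caches; values are as by pure recursion); structural
-- recursion on a fuel argument: every Python-side recursive call is on an argument < n, so fuel
-- n + 1 always suffices and the fuel-exhausted branch is never reached (a totality guard only);
-- the `n < 0 → -1` branch of `f` is inlined at each call site via the sentinel guards below
def fAGo : Nat → Nat → Int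
  | 0, _ => -1
  | fuel + 1, n =>
    let h : PySem.Set Int := PySem.Set.add (PySem.Set.add PySem.Set.empty
        (if n = 0 then -1 else fAGo fuel (n - 1)))
        (if n < 2 then -1 else fAGo fuel (n - 2))
    let h := (List.range (n / 2)).foldl (fun h j =>
        let i := j + 1
        let h := PySem.Set.add h (PySem.Int.bxor (fAGo fuel i) (fAGo fuel (n - i - 1)))
        PySem.Set.add h (PySem.Int.bxor (fAGo fuel i)
          (if n < i + 2 then -1 else fAGo fuel (n - i - 2)))) h
    mexLoopA h (h.length + 1) 0

def fA (n : Nat) : Int := fAGo (n + 1) n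

def isWinning (n : Int) (config : String) : String :=
  let s := config.toList.foldl (fun (st : Int × Nat) i =>
      if i = 'I' then (st.1, st.2 + 1)
      else if st.2 ≠ 0 then (PySem.Int.bxor st.1 (fA st.2), 0)
      else st) (0, 0)
  let x := if s.2 ≠ 0 then PySem.Int.bxor s.1 (fA s.2) else s.1
  if x ≠ 0 then "WIN" else "LOSE"

-- ===== PORT B =====
-- `v = 0; while v in reach: v += 1`
def mexLoopB (reach : PySem.Set Int) : Nat → Int → Int
  | 0, v => v
  | fuel + 1, v => if v ∈ reach then mexLoopB reach fuel (v + 1) else v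

-- the reachable-values set for table entry k, read off the already-filled prefix g
def reachB (g : List Int) (k : Nat) : PySem.Set Int :=
  let r := PySem.Set.add (PySem.Set.add PySem.Set.empty (g.getD (k - 1) 0))
      (if 2 ≤ k then g.getD (k - 2) 0 else -1)
  (List.range (k / 2)).foldl (fun r j =>
      let i := j + 1
      let r := PySem.Set.add r (PySem.Int.bxor (g.getD i 0) (g.getD (k - i - 1) 0))
      PySem.Set.add r (PySem.Int.bxor (g.getD i 0) (if i + 2 ≤ k then g.getD (k - i - 2) 0 else -1))) r

-- `g = [0]; for k in range(1, m+1): ... g.append(v)` as structural recursion on m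
def gTab : Nat → List Int
  | 0 => [0]
  | m + 1 =>
    let g := gTab m
    let reach := reachB g (m + 1)
    g ++ [mexLoopB reach (reach.length + 1) 0]

def isWinning_alt (n : Int) (config : String) : String :=
  let masked : List Char := config.toList.map (fun ch => if ch = 'I' then ch else ' ')
  let runs : List Nat := (PySem.Chars.split₀ masked).map (fun p => p.length)
  let m : Nat := PySem.List.maxD runs (fun r => r) 0
  let g := gTab m
  let x : Int := runs.foldl (fun x r => PySem.Int.bxor x (g.getD r 0)) 0
  if x ≠ 0 then "WIN" else "LOSE"

-- ===== PRECONDITION & SPEC =====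
def Spec_isWinning (n : Int) (config : String) (out : String) : Prop := out = isWinning_alt n config
instance (n : Int) (config : String) (out : String) : Decidable (Spec_isWinning n config out) := by unfold Spec_isWinning; infer_instance

-- ===== CLAIM (what is proved, stated in full; the proofs are below) =====
def Claim_equal_isWinning : Prop := ∀ (n : Int) (config : String), Dom_isWinning n config → Spec_isWinning n config (isWinning n config)

-- ===== LEMMAS AND PROOFS =====

theorem mexLoopA_eq_mexLoopB (h : PySem.Set Int) (fuel : Nat) (i : Int) :
    mexLoopA h fuel i = mexLoopB h fuel i := by
  induction fuel generalizing i with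
  | zero => rfl
  | succ fuel ih => simp [mexLoopA, mexLoopB, ih]

theorem gTab_length (m : Nat) : (gTab m).length = m + 1 := by
  induction m with
  | zero => rfl
  | succ m ih => simp [gTab, ih]

-- fuel does not matter as long as it exceeds n
theorem fAGo_irrel (n : Nat) : ∀ (a b : Nat), n < a → n < b → fAGo a n = fAGo b n := by
  induction n using Nat.strong_induction_on with
  | _ n ih =>
    intro a b ha hb
    obtain ⟨a, rfl⟩ : ∃ a', a = a' + 1 := ⟨a - 1, by omega⟩
    obtain ⟨b, rfl⟩ : ∃ b', b = b' + 1 := ⟨b - 1, by omega⟩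
    simp only [fAGo]
    have e1 : (if n = 0 then (-1 : Int) else fAGo a (n - 1))
        = (if n = 0 then (-1 : Int) else fAGo b (n - 1)) := by
      split_ifs with h
      · rfl
      · exact ih (n - 1) (by omega) a b (by omega) (by omega)
    have e2 : (if n < 2 then (-1 : Int) else fAGo a (n - 2))
        = (if n < 2 then (-1 : Int) else fAGo b (n - 2)) := by
      split_ifs with h
      · rfl
      · exact ih (n - 2) (by omega) a b (by omega) (by omega)
    rw [e1, e2]
    have e3 : (List.range (n / 2)).foldl (fun h j =>
          PySem.Set.add (PySem.Set.add h (PySem.Int.bxor (fAGo a (j + 1)) (fAGo a (n - (j + 1) - 1))))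
            (PySem.Int.bxor (fAGo a (j + 1))
              (if n < (j + 1) + 2 then -1 else fAGo a (n - (j + 1) - 2))))
        (PySem.Set.add (PySem.Set.add PySem.Set.empty (if n = 0 then (-1 : Int) else fAGo b (n - 1)))
          (if n < 2 then (-1 : Int) else fAGo b (n - 2)))
        = (List.range (n / 2)).foldl (fun h j =>
          PySem.Set.add (PySem.Set.add h (PySem.Int.bxor (fAGo b (j + 1)) (fAGo b (n - (j + 1) - 1))))
            (PySem.Int.bxor (fAGo b (j + 1))
              (if n < (j + 1) + 2 then -1 else fAGo b (n - (j + 1) - 2))))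
        (PySem.Set.add (PySem.Set.add PySem.Set.empty (if n = 0 then (-1 : Int) else fAGo b (n - 1)))
          (if n < 2 then (-1 : Int) else fAGo b (n - 2))) := by
      apply PySem.List.foldl_congr_mem
      intro acc j hj
      have hj' := List.mem_range.mp hj
      rw [ih (j + 1) (by omega) a b (by omega) (by omega),
        ih (n - (j + 1) - 1) (by omega) a b (by omega) (by omega)]
      by_cases hc : n < (j + 1) + 2
      · rw [if_pos hc, if_pos hc]
      · rw [if_neg hc, if_neg hc,
          ih (n - (j + 1) - 2) (by omega) a b (by omega) (by omega)]
    rw [e3]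

theorem fA_zero : fA 0 = 0 := by decide

-- the reachable set of fA's top level, written with fA itself at the recursive positions
def reachFA (n : Nat) : PySem.Set Int :=
  (List.range (n / 2)).foldl (fun h j =>
      PySem.Set.add (PySem.Set.add h (PySem.Int.bxor (fA (j + 1)) (fA (n - (j + 1) - 1))))
        (PySem.Int.bxor (fA (j + 1))
          (if n < (j + 1) + 2 then -1 else fA (n - (j + 1) - 2))))
    (PySem.Set.add (PySem.Set.add PySem.Set.empty (if n = 0 then (-1 : Int) else fA (n - 1)))
      (if n < 2 then (-1 : Int) else fA (n - 2)))

theorem fA_eq (n : Nat) : fA n = mexLoopA (reachFA n) ((reachFA n).length + 1) 0 := by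
  conv_lhs => rw [fA, fAGo]
  suffices hs : (PySem.Set.add (PySem.Set.add PySem.Set.empty
        (if n = 0 then (-1 : Int) else fAGo n (n - 1)))
        (if n < 2 then (-1 : Int) else fAGo n (n - 2))
      |> (List.range (n / 2)).foldl (fun h j =>
        PySem.Set.add (PySem.Set.add h (PySem.Int.bxor (fAGo n (j + 1)) (fAGo n (n - (j + 1) - 1))))
          (PySem.Int.bxor (fAGo n (j + 1))
            (if n < (j + 1) + 2 then -1 else fAGo n (n - (j + 1) - 2))))) = reachFA n by
    rw [hs]
  rw [reachFA]
  have e1 : (if n = 0 then (-1 : Int) else fAGo n (n - 1))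
      = (if n = 0 then (-1 : Int) else fA (n - 1)) := by
    split_ifs with h
    · rfl
    · exact fAGo_irrel (n - 1) n (n - 1 + 1) (by omega) (by omega)
  have e2 : (if n < 2 then (-1 : Int) else fAGo n (n - 2))
      = (if n < 2 then (-1 : Int) else fA (n - 2)) := by
    split_ifs with h
    · rfl
    · exact fAGo_irrel (n - 2) n (n - 2 + 1) (by omega) (by omega)
  rw [e1, e2]
  apply PySem.List.foldl_congr_mem
  intro acc j hj
  have hj' := List.mem_range.mp hj
  rw [show fAGo n (j + 1) = fA (j + 1) from
      fAGo_irrel (j + 1) n (j + 1 + 1) (by omega) (by omega),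
    show fAGo n (n - (j + 1) - 1) = fA (n - (j + 1) - 1) from
      fAGo_irrel (n - (j + 1) - 1) n (n - (j + 1) - 1 + 1) (by omega) (by omega)]
  by_cases hc : n < (j + 1) + 2
  · rw [if_pos hc, if_pos hc]
  · rw [if_neg hc, if_neg hc,
      show fAGo n (n - (j + 1) - 2) = fA (n - (j + 1) - 2) from
        fAGo_irrel (n - (j + 1) - 2) n (n - (j + 1) - 2 + 1) (by omega) (by omega)]

-- the DP table agrees with the recursion
theorem gTab_getD (m : Nat) : ∀ k, k ≤ m → (gTab m).getD k 0 = fA k := by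
  induction m with
  | zero =>
    intro k hk
    interval_cases k
    simp [gTab, fA_zero]
  | succ m ih =>
    intro k hk
    rcases Nat.lt_or_ge k (m + 1) with hlt | hge
    · rw [gTab]
      rw [List.getD_eq_getElem?_getD, List.getElem?_append_left (by simp [gTab_length]; omega),
        ← List.getD_eq_getElem?_getD]
      exact ih k (by omega)
    · have hk1 : k = m + 1 := by omega
      subst hk1
      rw [gTab]
      rw [List.getD_eq_getElem?_getD, List.getElem?_append_right (by simp [gTab_length]),
        gTab_length]
      simp only [Nat.sub_self, List.getElem?_cons_zero, Option.getD_some]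
      have hreach : reachB (gTab m) (m + 1) = reachFA (m + 1) := by
        rw [reachB, reachFA]
        have hbase : PySem.Set.add (PySem.Set.add PySem.Set.empty ((gTab m).getD (m + 1 - 1) 0))
            (if 2 ≤ m + 1 then (gTab m).getD (m + 1 - 2) 0 else -1) =
            PySem.Set.add (PySem.Set.add PySem.Set.empty
              (if m + 1 = 0 then (-1 : Int) else fA (m + 1 - 1)))
              (if m + 1 < 2 then (-1 : Int) else fA (m + 1 - 2)) := by
          rcases Nat.eq_zero_or_pos m with hm | hm
          · subst hm
            simp [gTab, fA_zero]
          · rw [if_pos (by omega : 2 ≤ m + 1), if_neg (by omega : ¬ m + 1 = 0),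
              if_neg (by omega : ¬ m + 1 < 2),
              ih (m + 1 - 1) (by omega), ih (m + 1 - 2) (by omega)]
        rw [hbase]
        apply PySem.List.foldl_congr_mem
        intro acc j hj
        have hj' := List.mem_range.mp hj
        dsimp only
        rw [ih (j + 1) (by omega), ih (m + 1 - (j + 1) - 1) (by omega)]
        by_cases hc : (j + 1) + 2 ≤ m + 1
        · rw [if_pos hc, if_neg (by omega), ih (m + 1 - (j + 1) - 2) (by omega)]
        · rw [if_neg hc, if_pos (by omega)]
      rw [fA_eq, ← hreach, mexLoopA_eq_mexLoopB]

-- the run lengths seen by A's single pass, as a recursive spec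
def runsA : List Char → Nat → List Nat
  | [], c => if c = 0 then [] else [c]
  | ch :: rest, c =>
    if ch = 'I' then runsA rest (c + 1)
    else if c = 0 then runsA rest 0 else c :: runsA rest 0

-- B's split of the masked string produces exactly those run lengths
theorem split_go_mask (l : List Char) (cur : List Char) (acc : List (List Char)) :
    (PySem.Chars.split₀.go (l.map (fun ch => if ch = 'I' then ch else ' ')) cur acc).map
        (fun p => p.length) =
      (acc.map (fun p => p.length)).reverse ++ runsA l cur.length := by
  induction l generalizing cur acc with
  | nil =>
    by_cases hc : cur = []
    · subst hc; simp [PySem.Chars.split₀.go, runsA]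
    · simp [PySem.Chars.split₀.go, runsA, List.isEmpty_iff, hc,
        List.length_eq_zero_iff]
  | cons ch rest ih =>
    by_cases hI : ch = 'I'
    · subst hI
      simp only [List.map_cons, if_true]
      rw [show PySem.Chars.split₀.go ('I' :: rest.map (fun ch => if ch = 'I' then ch else ' '))
          cur acc = PySem.Chars.split₀.go (rest.map (fun ch => if ch = 'I' then ch else ' '))
          ('I' :: cur) acc by simp [PySem.Chars.split₀.go, show PySem.Chars.isspace 'I' = false from rfl]]
      rw [ih]
      simp [runsA]
    · simp only [List.map_cons, if_neg hI]
      by_cases hc : cur = []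
      · subst hc
        rw [show PySem.Chars.split₀.go (' ' :: rest.map (fun ch => if ch = 'I' then ch else ' '))
            [] acc = PySem.Chars.split₀.go (rest.map (fun ch => if ch = 'I' then ch else ' '))
            [] acc by simp [PySem.Chars.split₀.go, show PySem.Chars.isspace ' ' = true from rfl]]
        rw [ih]
        simp [runsA, hI]
      · rw [show PySem.Chars.split₀.go (' ' :: rest.map (fun ch => if ch = 'I' then ch else ' '))
            cur acc = PySem.Chars.split₀.go (rest.map (fun ch => if ch = 'I' then ch else ' '))
            [] (cur.reverse :: acc) by simp [PySem.Chars.split₀.go, show PySem.Chars.isspace ' ' = true from rfl, List.isEmpty_iff, hc]]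
        rw [ih]
        simp [runsA, hI, hc, List.length_eq_zero_iff]

-- A's interleaved xor pass equals the xor of fA over the run lengths
theorem foldA_eq_runsA (l : List Char) (x : Int) (c : Nat) :
    (if (l.foldl (fun (st : Int × Nat) i =>
        if i = 'I' then (st.1, st.2 + 1)
        else if st.2 ≠ 0 then (PySem.Int.bxor st.1 (fA st.2), 0)
        else st) (x, c)).2 ≠ 0 then
      PySem.Int.bxor (l.foldl (fun (st : Int × Nat) i =>
        if i = 'I' then (st.1, st.2 + 1)
        else if st.2 ≠ 0 then (PySem.Int.bxor st.1 (fA st.2), 0)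
        else st) (x, c)).1 (fA (l.foldl (fun (st : Int × Nat) i =>
        if i = 'I' then (st.1, st.2 + 1)
        else if st.2 ≠ 0 then (PySem.Int.bxor st.1 (fA st.2), 0)
        else st) (x, c)).2)
     else (l.foldl (fun (st : Int × Nat) i =>
        if i = 'I' then (st.1, st.2 + 1)
        else if st.2 ≠ 0 then (PySem.Int.bxor st.1 (fA st.2), 0)
        else st) (x, c)).1) =
      (runsA l c).foldl (fun y r => PySem.Int.bxor y (fA r)) x := by
  induction l generalizing x c with
  | nil =>
    by_cases hc : c = 0 <;> simp [runsA, hc]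
  | cons ch rest ih =>
    by_cases hI : ch = 'I'
    · subst hI; simp only [List.foldl_cons, if_true, runsA]
      exact ih x (c + 1)
    · by_cases hc : c = 0
      · subst hc
        simpa [runsA, hI] using ih x 0
      · simp only [List.foldl_cons, if_neg hI, if_pos hc, runsA, hc]
        simpa [runsA, hI, hc] using ih (PySem.Int.bxor x (fA c)) 0

theorem runs_le_maxD (runs : List Nat) (r : Nat) (hr : r ∈ runs) :
    r ≤ PySem.List.maxD runs (fun r => r) 0 := by
  unfold PySem.List.maxD
  rcases h : PySem.List.max? runs (fun r => r) with _ | m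
  · rw [PySem.List.max?_eq_none_iff] at h; simp [h] at hr
  · simpa using PySem.List.max?_isMax h r hr

-- ===== VERDICT (by name: the statement is the Claim_ definition above) =====
theorem isWinning_spec : Claim_equal_isWinning := by
  intro n config _
  unfold Spec_isWinning isWinning isWinning_alt
  dsimp only
  rw [show PySem.Chars.split₀ (config.toList.map (fun ch => if ch = 'I' then ch else ' '))
      = PySem.Chars.split₀.go (config.toList.map (fun ch => if ch = 'I' then ch else ' ')) [] []
      from rfl]
  rw [split_go_mask]
  simp only [List.map_nil, List.reverse_nil, List.nil_append, List.length_nil]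
  rw [foldA_eq_runsA]
  have hx : (runsA config.toList 0).foldl (fun y r => PySem.Int.bxor y (fA r)) 0
      = (runsA config.toList 0).foldl (fun y r => PySem.Int.bxor y
          ((gTab (PySem.List.maxD (runsA config.toList 0) (fun r => r) 0)).getD r 0)) 0 := by
    apply PySem.List.foldl_congr_mem
    intro acc r hr
    rw [gTab_getD _ r (runs_le_maxD _ _ hr)]
  rw [hx]
  rfl
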